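-- pv_equiv track=rewrite | github.com/janny801/algoStuff | h5/pathMinCost.py | pathmincost
-- ===== SOURCE A (Python) =====
-- def pathmincost(costmatrix, totalrows, totalcols):
--
--     #mincost ; mincost to reach (row,col)
--     mincost=[]
--     for row in range(totalrows): #initial 2d matrix filled with all 0s
--         mincost.append([0] * totalcols)
--
--     #start w/ first column ; same as mincost
--     for row in range(totalrows):
--         mincost[row][0] = costmatrix[row][0]
--         #copies first col (as it is) into mincost matrix
--
--     #fill in rest of table column by column
--     for col in range(1,totalcols):
--         for row in range(totalrows):
--             #get positions we can come from in previous column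
--                 #mod incase need to wrap around
--             upperrow = (row - 1) %totalrows
--             samerow = row
--             lowerrow = (row +1) % totalrows
--
--             #assume we come from upper row
--             bestprevrow = upperrow
--
--             #check if coming from same row gives smaller cost
--             if mincost[samerow][col-1] < mincost[bestprevrow][col-1]:
--                 bestprevrow = samerow
--
--             #check if coming from lowerrow gives smaller cost
--             if mincost[lowerrow][col-1] < mincost[bestprevrow][col-1]:
--                 bestprevrow = lowerrow
--
--             #bestprevrow now properly stored (add to mincost matrix)
--             mincost[row][col] = costmatrix[row][col] + mincost[bestprevrow][col-1]
--
--     #after filling all rows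
--     #last col has total cost for all possible endings
--         #then get smallest value in last column -> return it
--     besttotalcost = mincost[0][totalcols-1] #assume row 0 is the lowest initially
--     for row in range(1,totalrows):
--         if mincost[row][totalcols-1] < besttotalcost:
--             besttotalcost = mincost [row][totalcols-1]
--
--     return besttotalcost
-- ===== SOURCE B (Python) =====
-- def pathmincost(costmatrix, totalrows, totalcols):
--     # top-down memoized recursion over (row, col) instead of a bottom-up table
--     memo = {}
--
--     def cost(r, c):
--         if (r, c) in memo:
--             return memo[(r, c)]
--         if c == 0:
--             v = costmatrix[r][0]
--         else:
--             v = costmatrix[r][c] + min(cost((r - 1) % totalrows, c - 1),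
--                                        cost(r, c - 1),
--                                        cost((r + 1) % totalrows, c - 1))
--         memo[(r, c)] = v
--         return v
--
--     return min(cost(r, totalcols - 1) for r in range(totalrows))
-- ===== Notes on version B (the rewrite author's own statement) =====
-- stated objective: alternative
-- what changed: Replaces A's bottom-up 2D DP table (two init loops, column-by-column fill with explicit best-previous-row if-chains, final column scan) by a top-down recursive helper cost(r,c) memoized in a dict keyed by (row,col), with the answer min(cost(r,totalcols-1)) over rows; the maintained structure is a lazily-filled memo instead of an eagerly-filled table.
import Mathlib
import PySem

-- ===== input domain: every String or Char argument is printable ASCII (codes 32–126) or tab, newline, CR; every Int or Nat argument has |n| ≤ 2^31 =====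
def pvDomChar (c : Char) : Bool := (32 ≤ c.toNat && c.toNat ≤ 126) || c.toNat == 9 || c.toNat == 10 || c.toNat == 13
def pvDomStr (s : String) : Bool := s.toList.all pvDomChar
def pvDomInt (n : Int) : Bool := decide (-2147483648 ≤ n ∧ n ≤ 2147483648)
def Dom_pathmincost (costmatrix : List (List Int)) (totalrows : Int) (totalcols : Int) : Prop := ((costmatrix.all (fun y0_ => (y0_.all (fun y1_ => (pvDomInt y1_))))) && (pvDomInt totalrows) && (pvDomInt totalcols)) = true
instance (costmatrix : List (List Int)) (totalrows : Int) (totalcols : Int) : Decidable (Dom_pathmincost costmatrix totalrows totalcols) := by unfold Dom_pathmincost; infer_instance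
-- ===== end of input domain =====

-- B replaces A's bottom-up 2D DP table by a top-down recursive cost(row,col) memoized in a
-- dict, taking min over the rows of the last column; equal return value on Pre_.

-- ===== PORT A =====
-- t[r][c] read / write with a default; exact for the in-range indices Pre_ guarantees
def pvGet2 (t : List (List Int)) (r c : Int) : Int :=
  PySem.List.pyGetD (PySem.List.pyGetD t r []) c 0

def pvSet2 (t : List (List Int)) (r c : Int) (v : Int) : List (List Int) :=
  PySem.List.pySetD t r (PySem.List.pySetD (PySem.List.pyGetD t r []) c v)

def pathmincost (costmatrix : List (List Int)) (totalrows : Int) (totalcols : Int) : Int :=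
  -- mincost = []; for row in range(totalrows): mincost.append([0]*totalcols)
  let mincost0 : List (List Int) :=
    (PySem.List.pyRange 0 totalrows 1).foldl
      (fun m _ => m ++ [List.replicate totalcols.toNat (0 : Int)]) []
  -- for row in range(totalrows): mincost[row][0] = costmatrix[row][0]
  let mincost1 :=
    (PySem.List.pyRange 0 totalrows 1).foldl
      (fun m row => pvSet2 m row 0 (pvGet2 costmatrix row 0)) mincost0
  -- for col in range(1, totalcols): for row in range(totalrows): …
  let mincost2 :=
    (PySem.List.pyRange 1 totalcols 1).foldl (fun m col =>
      (PySem.List.pyRange 0 totalrows 1).foldl (fun m row =>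
        let upperrow := PySem.Int.mod (row - 1) totalrows
        let samerow := row
        let lowerrow := PySem.Int.mod (row + 1) totalrows
        let bestprevrow := upperrow
        let bestprevrow :=
          if pvGet2 m samerow (col - 1) < pvGet2 m bestprevrow (col - 1) then samerow
          else bestprevrow
        let bestprevrow :=
          if pvGet2 m lowerrow (col - 1) < pvGet2 m bestprevrow (col - 1) then lowerrow
          else bestprevrow
        pvSet2 m row col (pvGet2 costmatrix row col + pvGet2 m bestprevrow (col - 1))) m) mincost1
  -- besttotalcost = mincost[0][totalcols-1]; for row in range(1, totalrows): …
  (PySem.List.pyRange 1 totalrows 1).foldl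
    (fun best row =>
      if pvGet2 mincost2 row (totalcols - 1) < best then pvGet2 mincost2 row (totalcols - 1)
      else best)
    (pvGet2 mincost2 0 (totalcols - 1))

-- ===== PORT B =====
-- def cost(r, c): memoized recursion; the recursion argument c is a Nat (every call site in
-- Source B has c >= 0 on Pre_), the memo is the dict, threaded through the three recursive calls
def pvCost (cm : List (List Int)) (tr : Int) :
    Nat → Int → PySem.Dict (Int × Nat) Int → Int × PySem.Dict (Int × Nat) Int
  | c, r, memo =>
    match memo.get? (r, c) with
    | some v => (v, memo)                         -- if (r, c) in memo: return memo[(r, c)]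
    | none =>
      match c with
      | 0 =>
        let v := pvGet2 cm r 0                    -- v = costmatrix[r][0]
        (v, memo.insert (r, 0) v)                 -- memo[(r, c)] = v; return v
      | Nat.succ k =>
        let p1 := pvCost cm tr k (PySem.Int.mod (r - 1) tr) memo
        let p2 := pvCost cm tr k r p1.2
        let p3 := pvCost cm tr k (PySem.Int.mod (r + 1) tr) p2.2
        let v := pvGet2 cm r ((k : Int) + 1) + min (min p1.1 p2.1) p3.1
        (v, p3.2.insert (r, k + 1) v)

def pathmincost_alt (costmatrix : List (List Int)) (totalrows : Int) (totalcols : Int) : Int :=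
  -- min(cost(r, totalcols - 1) for r in range(totalrows)), memo shared across the generator
  let res := (PySem.List.pyRange 0 totalrows 1).foldl
    (fun (st : List Int × PySem.Dict (Int × Nat) Int) r =>
      let p := pvCost costmatrix totalrows (totalcols - 1).toNat r st.2
      (st.1 ++ [p.1], p.2)) ([], PySem.Dict.empty)
  (PySem.List.min? res.1 (fun x => x)).getD 0

-- ===== PRECONDITION & SPEC =====
-- Exactly the inputs on which Python A returns: positive dimensions, at least totalrows rows,
-- and each of the first totalrows rows at least totalcols wide (otherwise A raises IndexError).
def Pre_pathmincost (costmatrix : List (List Int)) (totalrows : Int) (totalcols : Int) : Prop :=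
  0 < totalrows ∧ 0 < totalcols ∧ totalrows ≤ (costmatrix.length : Int) ∧
    ∀ row ∈ costmatrix.take totalrows.toNat, totalcols ≤ (row.length : Int)
instance (costmatrix : List (List Int)) (totalrows : Int) (totalcols : Int) : Decidable (Pre_pathmincost costmatrix totalrows totalcols) := by unfold Pre_pathmincost; infer_instance

def pvWitness_pathmincost : List (List Int) × Int × Int := ([[1, 2], [4, 3]], 2, 2)

def Spec_pathmincost (costmatrix : List (List Int)) (totalrows : Int) (totalcols : Int) (out : Int) : Prop := out = pathmincost_alt costmatrix totalrows totalcols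
instance (costmatrix : List (List Int)) (totalrows : Int) (totalcols : Int) (out : Int) : Decidable (Spec_pathmincost costmatrix totalrows totalcols out) := by unfold Spec_pathmincost; infer_instance

-- ===== CLAIM (what is proved, stated in full; the proofs are below) =====
def Claim_equal_pathmincost : Prop := ∀ (costmatrix : List (List Int)) (totalrows : Int) (totalcols : Int), Dom_pathmincost costmatrix totalrows totalcols → Pre_pathmincost costmatrix totalrows totalcols → Spec_pathmincost costmatrix totalrows totalcols (pathmincost costmatrix totalrows totalcols)

-- ===== LEMMAS AND PROOFS =====

-- the pure min-cost recurrence both programs compute (proof-side description)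
def pvC (cm : List (List Int)) (tr : Int) : Nat → Int → Int
  | 0, r => pvGet2 cm r 0
  | k + 1, r =>
    pvGet2 cm r ((k : Int) + 1) +
      min (min (pvC cm tr k (PySem.Int.mod (r - 1) tr)) (pvC cm tr k r))
          (pvC cm tr k (PySem.Int.mod (r + 1) tr))

-- one column-to-column step of the recurrence on whole columns
def pvStep (cm : List (List Int)) (tr : Int) (prev : List Int) (c : Int) : List Int :=
  (PySem.List.pyRange 0 tr 1).map (fun r =>
    pvGet2 cm r c +
      min (min (PySem.List.pyGetD prev (PySem.Int.mod (r - 1) tr) 0)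
               (PySem.List.pyGetD prev r 0))
          (PySem.List.pyGetD prev (PySem.Int.mod (r + 1) tr) 0))

-- the column vector after columns 0..c
def pvCol (cm : List (List Int)) (tr : Int) : Nat → List Int
  | 0 => (PySem.List.pyRange 0 tr 1).map (fun r => pvGet2 cm r 0)
  | c + 1 => pvStep cm tr (pvCol cm tr c) ((c : Int) + 1)

-- the value A's inner-loop body writes at (row, col), with A's let/if chain
def pvWAval (cm : List (List Int)) (tr : Int) (col : Int) (m : List (List Int)) (row : Int) : Int :=
  let upperrow := PySem.Int.mod (row - 1) tr
  let samerow := row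
  let lowerrow := PySem.Int.mod (row + 1) tr
  let bestprevrow := upperrow
  let bestprevrow :=
    if pvGet2 m samerow (col - 1) < pvGet2 m bestprevrow (col - 1) then samerow
    else bestprevrow
  let bestprevrow :=
    if pvGet2 m lowerrow (col - 1) < pvGet2 m bestprevrow (col - 1) then lowerrow
    else bestprevrow
  pvGet2 cm row col + pvGet2 m bestprevrow (col - 1)

-- a well-shaped n×m table
def pvTab (n m : Nat) (T : List (List Int)) : Prop :=
  T.length = n ∧ ∀ i : Int, 0 ≤ i → i < (n : Int) → (PySem.List.pyGetD T i []).length = m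

-- A's if-chain picks a row whose previous-column entry is the min of the three candidates
theorem pvWAval_min (cm : List (List Int)) (tr col : Int) (m : List (List Int)) (row : Int) :
    pvWAval cm tr col m row =
      pvGet2 cm row col +
        min (min (pvGet2 m (PySem.Int.mod (row - 1) tr) (col - 1)) (pvGet2 m row (col - 1)))
            (pvGet2 m (PySem.Int.mod (row + 1) tr) (col - 1)) := by
  simp only [pvWAval, apply_ite (fun i => pvGet2 m i (col - 1))]
  split_ifs <;> omega

theorem pv_tab_set2 (n m : Nat) (T : List (List Int)) (hT : pvTab n m T)
    (r0 c0 : Int) (hr0 : 0 ≤ r0) (hr0' : r0 < (n : Int)) (v : Int) :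
    pvTab n m (pvSet2 T r0 c0 v) := by
  obtain ⟨hlen, hrows⟩ := hT
  refine ⟨by simpa [pvSet2, PySem.List.length_pySetD] using hlen, ?_⟩
  intro i hi hi'
  unfold pvSet2
  rw [PySem.List.pySetD_of_nonneg _ _ hr0]
  rw [PySem.List.pyGetD_eq_getElem _ _ hi (by rw [List.length_set]; omega)]
  rw [List.getElem_set]
  split_ifs
  · rw [PySem.List.length_pySetD]; exact hrows r0 hr0 hr0'
  · have h := hrows i hi hi'
    rw [PySem.List.pyGetD_eq_getElem _ _ hi (by omega)] at h
    exact h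

theorem pv_get2_set2 (n m : Nat) (T : List (List Int)) (hT : pvTab n m T)
    (r0 c0 : Int) (hr0 : 0 ≤ r0) (hr0' : r0 < (n : Int)) (hc0 : 0 ≤ c0) (hc0' : c0 < (m : Int))
    (v : Int) (r j : Int) (hr : 0 ≤ r) (hr' : r < (n : Int)) (hj : 0 ≤ j) (hj' : j < (m : Int)) :
    pvGet2 (pvSet2 T r0 c0 v) r j = if r = r0 ∧ j = c0 then v else pvGet2 T r j := by
  obtain ⟨hlen, hrows⟩ := hT
  have hrowr := hrows r hr hr'
  have hrow0 := hrows r0 hr0 hr0'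
  unfold pvGet2 pvSet2
  rw [PySem.List.pySetD_of_nonneg _ _ hr0]
  rw [PySem.List.pyGetD_eq_getElem _ _ hr (by rw [List.length_set]; omega)]
  rw [List.getElem_set]
  by_cases hrr : r = r0
  · subst hrr
    rw [if_pos (by omega), PySem.List.pySetD_of_nonneg _ _ hc0]
    rw [PySem.List.pyGetD_eq_getElem _ _ hr (show r < (T.length:Int) by omega)] at hrowr ⊢
    by_cases hjj : j = c0
    · subst hjj
      rw [PySem.List.pyGetD_eq_getElem _ _ hj (by rw [List.length_set]; omega)]
      rw [List.getElem_set, if_pos rfl, if_pos ⟨rfl, rfl⟩]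
    · rw [PySem.List.pyGetD_eq_getElem _ _ hj (by rw [List.length_set]; omega)]
      rw [List.getElem_set, if_neg (by omega), if_neg (by tauto)]
      rw [PySem.List.pyGetD_eq_getElem _ _ hj (by omega)]
  · rw [if_neg (by omega), if_neg (by tauto)]
    rw [PySem.List.pyGetD_eq_getElem _ _ hr (by omega)]

-- generic column-write loop: folding writes of w into column c
theorem pv_fold_set_col (n m : Nat) (c : Int) (hc : 0 ≤ c) (hc' : c < (m : Int))
    (w : List (List Int) → Int → Int)
    (hw : ∀ T r0 v r, pvTab n m T → 0 ≤ r0 → r0 < (n : Int) → 0 ≤ r → r < (n : Int) →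
      w (pvSet2 T r0 c v) r = w T r) :
    ∀ (rs : List Int) (T : List (List Int)), pvTab n m T →
      (∀ r ∈ rs, 0 ≤ r ∧ r < (n : Int)) →
      pvTab n m (rs.foldl (fun T r => pvSet2 T r c (w T r)) T) ∧
      ∀ r j : Int, 0 ≤ r → r < (n : Int) → 0 ≤ j → j < (m : Int) →
        pvGet2 (rs.foldl (fun T r => pvSet2 T r c (w T r)) T) r j =
          if j = c ∧ r ∈ rs then w T r else pvGet2 T r j := by
  intro rs
  induction rs with
  | nil => exact fun T hT _ => ⟨hT, fun r j _ _ _ _ => by simp⟩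
  | cons r0 rest ih =>
    intro T hT hb
    have hr0 := hb r0 (by simp)
    have hT1 : pvTab n m (pvSet2 T r0 c (w T r0)) :=
      pv_tab_set2 n m T hT r0 c hr0.1 hr0.2 _
    obtain ⟨hTab, hEnt⟩ := ih (pvSet2 T r0 c (w T r0)) hT1 (fun r hr => hb r (by simp [hr]))
    refine ⟨hTab, ?_⟩
    intro r j hr hr' hj hj'
    simp only [List.foldl_cons]
    rw [hEnt r j hr hr' hj hj']
    rw [hw T r0 (w T r0) r hT hr0.1 hr0.2 hr hr']
    rw [pv_get2_set2 n m T hT r0 c hr0.1 hr0.2 hc hc' _ r j hr hr' hj hj']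
    by_cases h1 : j = c <;> by_cases h2 : r ∈ rest <;> by_cases h3 : r = r0 <;> simp_all

-- table invariant after columns 0..c have been filled
def pvP (cm : List (List Int)) (n m c : Nat) (T : List (List Int)) : Prop :=
  pvTab n m T ∧ ∀ r j : Int, 0 ≤ r → r < (n : Int) → 0 ≤ j → j < (m : Int) →
    pvGet2 T r j = if j ≤ (c : Int) then PySem.List.pyGetD (pvCol cm (n : Int) j.toNat) r 0 else 0

theorem pv_init (cm : List (List Int)) (n m : Nat) (hm : 0 < m) :
    pvP cm n m 0 ((PySem.List.pyRange 0 (n : Int) 1).foldl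
      (fun T row => pvSet2 T row 0 (pvGet2 cm row 0))
      (List.replicate n (List.replicate m (0 : Int)))) := by
  have hT0 : pvTab n m (List.replicate n (List.replicate m (0 : Int))) := by
    refine ⟨by simp, ?_⟩
    intro i hi hi'
    rw [PySem.List.pyGetD_eq_getElem _ _ hi (by simp; omega), List.getElem_replicate]
    simp
  have hget0 : ∀ r j : Int, 0 ≤ r → r < (n : Int) → 0 ≤ j → j < (m : Int) →
      pvGet2 (List.replicate n (List.replicate m (0 : Int))) r j = 0 := by
    intro r j hr hr' hj hj'
    unfold pvGet2
    rw [PySem.List.pyGetD_eq_getElem _ _ hr (by simp; omega), List.getElem_replicate]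
    rw [PySem.List.pyGetD_eq_getElem _ _ hj (by simp; omega), List.getElem_replicate]
  obtain ⟨hTab, hEnt⟩ := pv_fold_set_col n m 0 le_rfl (by exact_mod_cast hm)
      (fun T r => pvGet2 cm r 0) (fun _ _ _ _ _ _ _ _ _ => rfl)
      (PySem.List.pyRange 0 (n : Int) 1) (List.replicate n (List.replicate m 0)) hT0
      (fun r hr => by rw [PySem.List.mem_pyRange_one] at hr; exact ⟨hr.1, hr.2⟩)
  refine ⟨hTab, ?_⟩
  intro r j hr hr' hj hj'
  rw [hEnt r j hr hr' hj hj']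
  by_cases h : j = 0
  · subst h
    rw [if_pos ⟨rfl, PySem.List.mem_pyRange_one.mpr ⟨hr, hr'⟩⟩, if_pos (by omega)]
    show pvGet2 cm r 0 = PySem.List.pyGetD (pvCol cm (n : Int) (Int.toNat 0)) r 0
    simp only [Int.toNat_zero, pvCol]
    rw [PySem.List.pyGetD_map_pyRange_of_nonneg _ _ _ _ hr hr']
  · rw [if_neg (by tauto), if_neg (by omega), hget0 r j hr hr' hj hj']

theorem pv_col_step (cm : List (List Int)) (n m : Nat) (hn : 0 < n) (k : Nat) (hk : k + 1 < m)
    (T : List (List Int)) (hP : pvP cm n m k T) :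
    pvP cm n m (k + 1)
      ((PySem.List.pyRange 0 (n : Int) 1).foldl
        (fun T row => pvSet2 T row ((k : Int) + 1) (pvWAval cm (n : Int) ((k : Int) + 1) T row)) T) := by
  obtain ⟨hTab, hEnt⟩ := hP
  have hn' : (0 : Int) < (n : Int) := by exact_mod_cast hn
  set c : Int := (k : Int) + 1 with hcdef
  have hc : 0 ≤ c := by omega
  have hc' : c < (m : Int) := by omega
  have hw : ∀ T r0 v r, pvTab n m T → 0 ≤ r0 → r0 < (n : Int) → 0 ≤ r → r < (n : Int) →
      pvWAval cm (n : Int) c (pvSet2 T r0 c v) r = pvWAval cm (n : Int) c T r := by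
    intro T r0 v r hT h1 h2 h3 h4
    rw [pvWAval_min, pvWAval_min]
    have e : ∀ i : Int, 0 ≤ i → i < (n : Int) →
        pvGet2 (pvSet2 T r0 c v) i (c - 1) = pvGet2 T i (c - 1) := by
      intro i hi hi'
      rw [pv_get2_set2 n m T hT r0 c h1 h2 hc hc' v i (c - 1) hi hi' (by omega) (by omega)]
      rw [if_neg (by rintro ⟨-, h⟩; omega)]
    rw [e _ (PySem.Int.mod_nonneg _ hn') (PySem.Int.mod_lt _ hn'),
        e r h3 h4,
        e _ (PySem.Int.mod_nonneg _ hn') (PySem.Int.mod_lt _ hn')]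
  obtain ⟨hTab', hEnt'⟩ := pv_fold_set_col n m c hc hc' (pvWAval cm (n : Int) c) hw
      (PySem.List.pyRange 0 (n : Int) 1) T hTab
      (fun r hr => by rw [PySem.List.mem_pyRange_one] at hr; exact ⟨hr.1, hr.2⟩)
  refine ⟨hTab', ?_⟩
  intro r j hr hr' hj hj'
  rw [hEnt' r j hr hr' hj hj']
  have hread : ∀ i : Int, 0 ≤ i → i < (n : Int) →
      pvGet2 T i (c - 1) = PySem.List.pyGetD (pvCol cm (n : Int) k) i 0 := by
    intro i hi hi'
    rw [hEnt i (c - 1) hi hi' (by omega) (by omega), if_pos (by omega)]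
    have hk' : (c - 1).toNat = k := by omega
    rw [hk']
  by_cases h : j = c
  · subst h
    rw [if_pos ⟨rfl, PySem.List.mem_pyRange_one.mpr ⟨hr, hr'⟩⟩, if_pos (by omega)]
    have hjk : ((k : Int) + 1).toNat = k + 1 := by omega
    rw [hjk]
    rw [pvWAval_min]
    simp only [pvCol, pvStep]
    rw [PySem.List.pyGetD_map_pyRange_of_nonneg _ _ _ _ hr hr']
    rw [hread _ (PySem.Int.mod_nonneg _ hn') (PySem.Int.mod_lt _ hn'),
        hread r hr hr',
        hread _ (PySem.Int.mod_nonneg _ hn') (PySem.Int.mod_lt _ hn')]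
  · rw [if_neg (by tauto)]
    rw [hEnt r j hr hr' hj hj']
    by_cases h2 : j ≤ (k : Int)
    · rw [if_pos h2, if_pos (by omega)]
    · rw [if_neg h2, if_neg (by omega)]

theorem pv_outer (cm : List (List Int)) (n m : Nat) (hn : 0 < n) (T1 : List (List Int))
    (h1 : pvP cm n m 0 T1) :
    ∀ k : Nat, k < m → pvP cm n m k
      (((List.range k).map (fun i : Nat => (1 : Int) + (i : Int))).foldl
        (fun T col => (PySem.List.pyRange 0 (n : Int) 1).foldl
          (fun T row => pvSet2 T row col (pvWAval cm (n : Int) col T row)) T) T1) := by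
  intro k
  induction k with
  | zero => intro _; simpa using h1
  | succ k ih =>
    intro hk
    rw [List.range_succ, List.map_append, List.foldl_append]
    simp only [List.map_cons, List.map_nil, List.foldl_cons, List.foldl_nil]
    rw [show (1 : Int) + (k : Int) = (k : Int) + 1 by ring]
    exact pv_col_step cm n m hn k hk _ (ih (by omega))

-- the column vector holds the recurrence's values
theorem pvCol_eq_pvC (cm : List (List Int)) (n : Nat) (hn : 0 < n) :
    ∀ (k : Nat) (r : Int), 0 ≤ r → r < (n : Int) →
      PySem.List.pyGetD (pvCol cm (n : Int) k) r 0 = pvC cm (n : Int) k r := by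
  have hn' : (0 : Int) < (n : Int) := by exact_mod_cast hn
  intro k
  induction k with
  | zero =>
    intro r hr hr'
    simp only [pvCol, pvC]
    rw [PySem.List.pyGetD_map_pyRange_of_nonneg _ _ _ _ hr hr']
  | succ k ih =>
    intro r hr hr'
    simp only [pvCol, pvStep, pvC]
    rw [PySem.List.pyGetD_map_pyRange_of_nonneg _ _ _ _ hr hr']
    rw [ih _ (PySem.Int.mod_nonneg _ hn') (PySem.Int.mod_lt _ hn'),
        ih r hr hr',
        ih _ (PySem.Int.mod_nonneg _ hn') (PySem.Int.mod_lt _ hn')]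

-- memo soundness: every cached value is a value of the recurrence
def pvSound (cm : List (List Int)) (tr : Int) (memo : PySem.Dict (Int × Nat) Int) : Prop :=
  ∀ (r : Int) (c : Nat) (v : Int), memo.get? (r, c) = some v → v = pvC cm tr c r

theorem pvCost_sound (cm : List (List Int)) (tr : Int) :
    ∀ (c : Nat) (r : Int) (memo : PySem.Dict (Int × Nat) Int), pvSound cm tr memo →
      (pvCost cm tr c r memo).1 = pvC cm tr c r ∧ pvSound cm tr (pvCost cm tr c r memo).2 := by
  intro c
  induction c with
  | zero =>
    intro r memo hS
    cases hget : memo.get? (r, 0) with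
    | some v =>
      simp only [pvCost, hget]
      exact ⟨hS r 0 v hget, hS⟩
    | none =>
      simp only [pvCost, hget]
      refine ⟨rfl, ?_⟩
      intro r' c' v' h
      rw [PySem.Dict.get?_insert] at h
      by_cases he : (r', c') = (r, 0)
      · rw [if_pos he] at h
        injection he with h1 h2
        subst h1; subst h2
        simp only [pvC]
        exact (Option.some.inj h).symm
      · rw [if_neg he] at h
        exact hS r' c' v' h
  | succ k ih =>
    intro r memo hS
    cases hget : memo.get? (r, k + 1) with
    | some v =>
      simp only [pvCost, hget]
      exact ⟨hS r (k + 1) v hget, hS⟩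
    | none =>
      simp only [pvCost, hget]
      obtain ⟨e1, s1⟩ := ih (PySem.Int.mod (r - 1) tr) memo hS
      obtain ⟨e2, s2⟩ := ih r _ s1
      obtain ⟨e3, s3⟩ := ih (PySem.Int.mod (r + 1) tr) _ s2
      refine ⟨by simp only [pvC]; rw [e1, e2, e3], ?_⟩
      intro r' c' v' h
      rw [PySem.Dict.get?_insert] at h
      by_cases he : (r', c') = (r, k + 1)
      · rw [if_pos he] at h
        injection he with h1 h2
        subst h1; subst h2
        simp only [pvC]
        rw [← e1, ← e2, ← e3]
        exact (Option.some.inj h).symm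
      · rw [if_neg he] at h
        exact s3 r' c' v' h

-- B's generator loop produces the list of recurrence values
theorem pv_b_vals (cm : List (List Int)) (tr : Int) (k : Nat) :
    ∀ (rs : List Int) (acc : List Int) (memo : PySem.Dict (Int × Nat) Int), pvSound cm tr memo →
      (rs.foldl
        (fun (st : List Int × PySem.Dict (Int × Nat) Int) r =>
          let p := pvCost cm tr k r st.2
          (st.1 ++ [p.1], p.2)) (acc, memo)).1
        = acc ++ rs.map (pvC cm tr k) := by
  intro rs
  induction rs with
  | nil => intro acc memo _; simp
  | cons r rest ih =>
    intro acc memo hS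
    obtain ⟨e, s⟩ := pvCost_sound cm tr k r memo hS
    simp only [List.foldl_cons, List.map_cons]
    rw [ih _ _ s, e]
    simp

theorem pv_final (n : Nat) (hn : 0 < n) (T2 : List (List Int)) (jc : Int)
    (L : List Int) (g : Int → Int) (hL : L = (PySem.List.pyRange 0 (n : Int) 1).map g)
    (hread : ∀ r : Int, 0 ≤ r → r < (n : Int) → pvGet2 T2 r jc = PySem.List.pyGetD L r 0) :
    (PySem.List.pyRange 1 (n : Int) 1).foldl
        (fun best row => if pvGet2 T2 row jc < best then pvGet2 T2 row jc else best)
        (pvGet2 T2 0 jc)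
      = (PySem.List.min? L (fun x => x)).getD 0 := by
  subst hL
  have hn' : (0 : Int) < (n : Int) := by exact_mod_cast hn
  have h1 : (PySem.List.pyRange 1 (n : Int) 1).foldl
      (fun best row => if pvGet2 T2 row jc < best then pvGet2 T2 row jc else best)
      (pvGet2 T2 0 jc)
      = (PySem.List.pyRange 1 (n : Int) 1).foldl
        (fun b row => if g row < b then g row else b) (g 0) := by
    rw [hread 0 le_rfl hn', PySem.List.pyGetD_map_pyRange_of_nonneg _ _ _ _ le_rfl hn']
    exact PySem.List.foldl_congr_mem _ _ _ _ (fun acc x hx => by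
      rw [PySem.List.mem_pyRange_one] at hx
      rw [hread x (by omega) hx.2,
          PySem.List.pyGetD_map_pyRange_of_nonneg _ _ _ _ (by omega) hx.2])
  rw [h1]
  have h2 : (PySem.List.pyRange 0 (n : Int) 1).map g = g 0 :: (PySem.List.pyRange 1 (n : Int) 1).map g := by
    rw [PySem.List.pyRange_one_cons hn']
    norm_num
  rw [h2, PySem.List.min?_id_cons, Option.getD_some, List.foldl_map]
  exact PySem.List.foldl_congr_mem _ _ _ _ (fun acc x _ => by
    simp only [min_def]; split_ifs <;> omega)

-- ===== VERDICT (by name: the statement is the Claim_ definition above) =====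
theorem pathmincost_spec : Claim_equal_pathmincost := by
  intro cm tr tc _ hPre
  obtain ⟨htr, htc, -, -⟩ := hPre
  obtain ⟨n, rfl⟩ : ∃ n : Nat, tr = (n : Int) := ⟨tr.toNat, (Int.toNat_of_nonneg htr.le).symm⟩
  obtain ⟨m, rfl⟩ : ∃ m : Nat, tc = (m : Int) := ⟨tc.toNat, (Int.toNat_of_nonneg htc.le).symm⟩
  have hn : 0 < n := by exact_mod_cast htr
  have hm : 0 < m := by exact_mod_cast htc
  unfold Spec_pathmincost
  simp only [pathmincost, pathmincost_alt]
  -- B's side: the generator list is the recurrence values of column m-1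
  rw [pv_b_vals cm (n : Int) ((m : Int) - 1).toNat (PySem.List.pyRange 0 (n : Int) 1) []
      PySem.Dict.empty (fun r c v h => by simp [PySem.Dict.get?_empty] at h)]
  rw [List.nil_append, show ((m : Int) - 1).toNat = m - 1 from by omega]
  -- A's side
  have hT0 : (PySem.List.pyRange 0 (n : Int) 1).foldl
      (fun a (_ : Int) => a ++ [List.replicate ((m : Int)).toNat (0 : Int)]) ([] : List (List Int))
      = List.replicate n (List.replicate m (0 : Int)) := by
    rw [PySem.List.foldl_append_singleton_eq_map (fun _ => List.replicate ((m : Int)).toNat (0 : Int))]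
    simp [PySem.List.length_pyRange_one, List.map_const']
  rw [hT0]
  rw [PySem.List.pyRange_one 1 (m : Int), show (((m : Int)) - 1).toNat = m - 1 from by omega]
  have hP := pv_outer cm n m hn _ (pv_init cm n m hm) (m - 1) (by omega)
  refine pv_final n hn _ ((m : Int) - 1)
      ((PySem.List.pyRange 0 (n : Int) 1).map (pvC cm (n : Int) (m - 1)))
      (pvC cm (n : Int) (m - 1)) rfl ?_
  intro r hr hr'
  have h := hP.2 r ((m : Int) - 1) hr hr' (by omega) (by omega)
  rw [if_pos (by omega), show (((m : Int)) - 1).toNat = m - 1 from by omega] at h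
  have h2 : PySem.List.pyGetD (pvCol cm (n : Int) (m - 1)) r 0
      = PySem.List.pyGetD ((PySem.List.pyRange 0 (n : Int) 1).map (pvC cm (n : Int) (m - 1))) r 0 := by
    rw [pvCol_eq_pvC cm n hn (m - 1) r hr hr',
        PySem.List.pyGetD_map_pyRange_of_nonneg _ _ _ _ hr hr']
  exact h.trans h2
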